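-- pv_equiv track=rewrite | github.com/chagmn/Algorithm-by-Python | Programmers/Level2/124 나라의 숫자/solving.py | solution
-- ===== SOURCE A (Python) =====
-- def solution(n):
--     answer = ""
--     namuji = ["4", "1", "2"]
--
--     while n:
--         answer = namuji[n % 3] + answer
--
--         if n % 3 == 0:
--             n = n // 3 - 1
--         else:
--             n = n // 3
--     return answer
-- ===== SOURCE B (Python) =====
-- def solution(n):
--     if n == 0:
--         return ""
--     d = ["4", "1", "2"][n % 3]
--     m = n // 3 - 1 if n % 3 == 0 else n // 3
--     return solution(m) + d
-- ===== Notes on version B (the rewrite author's own statement) =====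
-- stated objective: alternative
-- what changed: Replaced the while-loop that prepends digits to an accumulator string with a direct recursion on the reduced number that appends each digit after the recursive call.
import Mathlib
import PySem

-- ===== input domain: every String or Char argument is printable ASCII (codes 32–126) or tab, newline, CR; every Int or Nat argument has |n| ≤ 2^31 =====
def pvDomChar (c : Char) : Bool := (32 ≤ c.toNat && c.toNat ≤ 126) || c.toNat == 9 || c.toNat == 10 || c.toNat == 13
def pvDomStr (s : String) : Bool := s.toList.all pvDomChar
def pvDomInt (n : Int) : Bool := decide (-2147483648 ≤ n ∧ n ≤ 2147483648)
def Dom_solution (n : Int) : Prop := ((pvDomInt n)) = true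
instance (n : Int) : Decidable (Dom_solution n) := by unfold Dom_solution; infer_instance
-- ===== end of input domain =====

-- B replaces A's digit-prepending while-loop with a direct recursion that appends each digit
-- after the recursive call (alternative decomposition, same cost).
-- Pre_solution excludes n < 0, on which the Python A (and B) never terminates.


-- ===== PORT A =====
-- the while-loop of A, state (n, answer); the fuel argument (initially n.toNat, enough since n
-- strictly decreases each iteration) only makes the loop total — for n < 0 Python's 'while n'
-- never terminates, and such n are outside Pre_solution
def solutionLoopA : Nat → Int → String → String
  | 0, _, answer => answer
  | fuel + 1, n, answer =>
    if 0 < n then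
      solutionLoopA fuel
        (if PySem.Int.mod n 3 = 0 then PySem.Int.floordiv n 3 - 1 else PySem.Int.floordiv n 3)
        (((PySem.List.pyGet? ["4", "1", "2"] (PySem.Int.mod n 3)).getD "") ++ answer)
    else answer

def solution (n : Int) : String := solutionLoopA n.toNat n ""

-- ===== PORT B =====
-- Source B: base case returns the empty string; otherwise recurse on the reduced number and append the digit.
-- The fuel (initially n.toNat) only makes the recursion total (B's Python recursion diverges
-- for n < 0, outside Pre_solution).
def solutionAltGo : Nat → Int → String
  | 0, _ => ""
  | fuel + 1, n =>
    if 0 < n then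
      let d := (PySem.List.pyGet? ["4", "1", "2"] (PySem.Int.mod n 3)).getD ""
      let m := if PySem.Int.mod n 3 = 0 then PySem.Int.floordiv n 3 - 1 else PySem.Int.floordiv n 3
      solutionAltGo fuel m ++ d
    else ""

def solution_alt (n : Int) : String := solutionAltGo n.toNat n

-- ===== PRECONDITION & SPEC =====
-- Pre_ excludes n < 0: there Python A's 'while n' loop never terminates (no value is returned).
def Pre_solution (n : Int) : Prop := 0 ≤ n
instance (n : Int) : Decidable (Pre_solution n) := by unfold Pre_solution; infer_instance
def pvWitness_solution : Int := (10)

def Spec_solution (n : Int) (out : String) : Prop := out = solution_alt n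
instance (n : Int) (out : String) : Decidable (Spec_solution n out) := by unfold Spec_solution; infer_instance

-- ===== CLAIM (what is proved, stated in full; the proofs are below) =====
def Claim_equal_solution : Prop := ∀ (n : Int), Dom_solution n → Pre_solution n → Spec_solution n (solution n)

-- ===== LEMMAS AND PROOFS =====
theorem loopA_eq_altGo : ∀ (k : Nat) (n : Int), n.toNat ≤ k → 0 ≤ n →
    ∀ (ans : String), solutionLoopA k n ans = solutionAltGo k n ++ ans := by
  intro k
  induction k with
  | zero =>
    intro n hk hn ans
    simp [solutionLoopA, solutionAltGo]
  | succ k ih =>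
    intro n hk hn ans
    rw [solutionLoopA, solutionAltGo]
    by_cases h : 0 < n
    · simp only [if_pos h]
      have h3 : (0:Int) < 3 := by norm_num
      have hm := PySem.Int.mod_eq_emod_of_pos (a := n) h3
      have hd := PySem.Int.floordiv_eq_ediv_of_pos (a := n) h3
      set m := if PySem.Int.mod n 3 = 0 then PySem.Int.floordiv n 3 - 1 else PySem.Int.floordiv n 3 with hmdef
      have hrec : m.toNat ≤ k ∧ 0 ≤ m := by
        rw [hmdef, hm, hd]; split <;> omega
      rw [ih m hrec.1 hrec.2]
      simp [String.append_assoc]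
    · simp [h]

theorem solution_spec : Claim_equal_solution := by
  intro n _ hpre
  unfold Spec_solution solution solution_alt
  have := loopA_eq_altGo n.toNat n (le_refl _) hpre ""
  simpa using this
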